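-- pv_equiv track=rewrite | github.com/SergioMisas/Juego_Del_21 | Juego21Python/juego21python.py | puntos
-- ===== SOURCE A (Python) =====
-- def puntos(lista):
--     jugador1 = 0
--     jugador2 = 0
--     empates = 0
--     for resultado in lista:
--         if resultado == 1:
--             jugador1 += 1
--         elif resultado == 2:
--             jugador2 += 1
--         else:
--             empates += 1
--     return jugador1, jugador2, empates
-- ===== SOURCE B (Python) =====
-- def puntos(lista):
--     jugador1 = lista.count(1)
--     jugador2 = lista.count(2)
--     empates = len(lista) - jugador1 - jugador2
--     return jugador1, jugador2, empates
-- ===== Notes on version B (the rewrite author's own statement) =====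
-- stated objective: idiomatic
-- what changed: Replaces the single branching accumulator loop with three independent list.count scans and computes the ties as length minus the two counts.
import Mathlib
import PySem

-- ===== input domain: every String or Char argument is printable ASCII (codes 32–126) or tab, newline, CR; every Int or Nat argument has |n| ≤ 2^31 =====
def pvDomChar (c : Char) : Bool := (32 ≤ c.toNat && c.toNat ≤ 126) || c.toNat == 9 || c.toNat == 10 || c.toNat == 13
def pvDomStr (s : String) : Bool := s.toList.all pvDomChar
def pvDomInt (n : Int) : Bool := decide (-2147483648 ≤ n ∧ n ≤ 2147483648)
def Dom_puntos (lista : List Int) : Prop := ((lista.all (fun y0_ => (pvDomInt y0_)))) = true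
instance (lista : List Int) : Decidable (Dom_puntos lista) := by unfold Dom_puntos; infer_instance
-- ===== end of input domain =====

-- B replaces A's single branching accumulator loop by three independent list.count scans (ties = length minus the two counts); same O(n) cost, more idiomatic.


-- ===== PORT A =====
def puntos (lista : List Int) : Int × Int × Int :=
  lista.foldl (fun (acc : Int × Int × Int) resultado =>
    if resultado == 1 then (acc.1 + 1, acc.2.1, acc.2.2)
    else if resultado == 2 then (acc.1, acc.2.1 + 1, acc.2.2)
    else (acc.1, acc.2.1, acc.2.2 + 1)) (0, 0, 0)

-- ===== PORT B =====
def puntos_alt (lista : List Int) : Int × Int × Int :=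
  let jugador1 : Int := PySem.List.count lista 1
  let jugador2 : Int := PySem.List.count lista 2
  let empates : Int := (lista.length : Int) - jugador1 - jugador2
  (jugador1, jugador2, empates)

-- ===== PRECONDITION & SPEC =====
def Spec_puntos (lista : List Int) (out : Int × Int × Int) : Prop := out = puntos_alt lista
instance (lista : List Int) (out : Int × Int × Int) : Decidable (Spec_puntos lista out) := by unfold Spec_puntos; infer_instance

-- ===== CLAIM (what is proved, stated in full; the proofs are below) =====
def Claim_equal_puntos : Prop := ∀ (lista : List Int), Dom_puntos lista → Spec_puntos lista (puntos lista)

-- ===== LEMMAS AND PROOFS =====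

-- ===== VERDICT (by name: the statement is the Claim_ definition above) =====
lemma puntos_foldl (l : List Int) (a b c : Int) :
    l.foldl (fun (acc : Int × Int × Int) resultado =>
      if resultado == 1 then (acc.1 + 1, acc.2.1, acc.2.2)
      else if resultado == 2 then (acc.1, acc.2.1 + 1, acc.2.2)
      else (acc.1, acc.2.1, acc.2.2 + 1)) (a, b, c)
    = (a + l.count 1, b + l.count 2, c + ((l.length : Int) - l.count 1 - l.count 2)) := by
  induction l generalizing a b c with
  | nil => simp
  | cons x xs ih =>
    rw [List.foldl_cons]
    by_cases h1 : x = 1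
    · rw [if_pos (by simp [h1]), ih]
      simp [h1, Prod.ext_iff]
      push_cast
      omega
    · by_cases h2 : x = 2
      · rw [if_neg (by simp [h1]), if_pos (by simp [h2]), ih]
        simp [h1, h2, Prod.ext_iff]
        push_cast
        omega
      · rw [if_neg (by simp [h1]), if_neg (by simp [h2]), ih]
        simp [h1, h2, Prod.ext_iff]
        push_cast
        omega

theorem puntos_spec : Claim_equal_puntos := by
  intro lista _
  unfold Spec_puntos puntos puntos_alt
  rw [puntos_foldl]
  simp [PySem.List.count]
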